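-- pv_equiv track=rewrite | github.com/fcpratik/Cross-Lingual_Relation_Extraction | Q3/icl_reference.py | find_closest_label
-- ===== SOURCE A (Python) =====
-- def find_closest_label(generated, valid_labels):
--     generated = generated.strip().split("\n")[0].strip()
--
--     if generated in valid_labels:
--         return generated
--     if generated == "NA" or generated.lower() == "na" or generated.lower() == "none":
--         return "NA"
--
--     gen_lower = generated.lower()
--     for lbl in valid_labels:
--         if lbl.lower() == gen_lower:
--             return lbl
--     for lbl in valid_labels:
--         if lbl in generated:
--             return lbl
--     for lbl in valid_labels:
--         if generated in lbl and len(generated) > 3: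
--             return lbl
--
--     # Partial path match
--     gen_parts = generated.strip("/").split("/")
--     best_match, best_score = None, 0
--     for lbl in valid_labels:
--         lbl_parts = lbl.strip("/").split("/")
--         score = sum(1 for gp, lp in zip(reversed(gen_parts), reversed(lbl_parts))
--                     if gp.lower() == lp.lower())
--         if score > best_score:
--             best_score = score
--             best_match = lbl
--     if best_match and best_score > 0:
--         return best_match
--
--     return "NA"
-- ===== SOURCE B (Python) =====
-- def _label_key(lbl, generated, gen_lower, rev_gen):
--     if lbl.lower() == gen_lower:
--         return (4, 0)
--     if lbl in generated:
--         return (3, 0)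
--     if generated in lbl and len(generated) > 3:
--         return (2, 0)
--     score = sum(1 for gp, lp in zip(rev_gen, reversed(lbl.strip("/").split("/")))
--                 if gp.lower() == lp.lower())
--     return (1, score) if score > 0 else (0, 0)
--
--
-- def find_closest_label(generated, valid_labels):
--     generated = generated.strip().split("\n")[0].strip()
--     if generated in valid_labels:
--         return generated
--     if generated == "NA" or generated.lower() in ("na", "none"):
--         return "NA"
--     gen_lower = generated.lower()
--     rev_gen = list(reversed(generated.strip("/").split("/")))
--     best, best_key = "NA", (0, 0)
--     for lbl in valid_labels:
--         key = _label_key(lbl, generated, gen_lower, rev_gen)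
--         if key > best_key:
--             best, best_key = lbl, key
--     return best
-- ===== Notes on version B (the rewrite author's own statement) =====
-- stated objective: alternative
-- what changed: A's four separate sequential scans over valid_labels (case-insensitive match, substring match each way, then a best-path-score loop) are replaced by a single pass that assigns each label a (tier, score) priority key and keeps the first strictly-best label under lexicographic comparison.
import Mathlib
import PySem

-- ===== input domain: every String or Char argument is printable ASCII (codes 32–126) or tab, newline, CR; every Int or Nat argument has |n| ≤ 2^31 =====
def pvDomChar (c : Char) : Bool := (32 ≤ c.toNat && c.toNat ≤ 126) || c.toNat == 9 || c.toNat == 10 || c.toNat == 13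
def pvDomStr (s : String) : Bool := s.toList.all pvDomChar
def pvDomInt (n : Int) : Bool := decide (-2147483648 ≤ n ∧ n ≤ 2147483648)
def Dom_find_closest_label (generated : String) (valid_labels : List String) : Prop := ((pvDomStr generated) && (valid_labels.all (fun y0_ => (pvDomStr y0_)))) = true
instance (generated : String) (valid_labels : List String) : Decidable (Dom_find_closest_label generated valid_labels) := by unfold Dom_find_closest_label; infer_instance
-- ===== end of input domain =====

-- B replaces A's four separate scans over valid_labels by a single pass that ranks each
-- label with a (tier, score) priority key and keeps the first strictly-best label
-- (objective: alternative decomposition, same cost).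

-- ===== PORT A =====
def find_closest_label (generated : String) (valid_labels : List String) : String :=
  let g := PySem.Str.strip (PySem.List.pyGetD ((PySem.Str.split? (PySem.Str.strip generated) "\n").getD []) 0 "")
  if valid_labels.contains g then g
  else if g == "NA" || PySem.Str.lower g == "na" || PySem.Str.lower g == "none" then "NA"
  else
    let gen_lower := PySem.Str.lower g
    match valid_labels.find? (fun lbl => PySem.Str.lower lbl == gen_lower) with
    | some lbl => lbl
    | none =>
      match valid_labels.find? (fun lbl => PySem.Str.isIn lbl g) with
      | some lbl => lbl
      | none =>
        match valid_labels.find? (fun lbl => PySem.Str.isIn g lbl && decide (3 < PySem.Str.len g)) with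
        | some lbl => lbl
        | none =>
          let gen_parts := (PySem.Str.split? (PySem.Str.stripChars g "/") "/").getD []
          let r := valid_labels.foldl (pvAStep gen_parts) (none, 0)
          match r.1 with
          | some bm => if bm != "" && decide (0 < r.2) then bm else "NA"
          | none => "NA"
where
  -- one iteration of A's partial-path-match loop
  pvAStep (gen_parts : List String) (st : Option String × Int) (lbl : String) : Option String × Int :=
    let lbl_parts := (PySem.Str.split? (PySem.Str.stripChars lbl "/") "/").getD []
    let score : Int := ((gen_parts.reverse.zip lbl_parts.reverse).countP
      (fun p => PySem.Str.lower p.1 == PySem.Str.lower p.2) : Nat)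
    if st.2 < score then (some lbl, score) else st

-- ===== PORT B =====
-- the (tier, score) priority key of one label (Source B's _label_key)
def pvKey (g gl : String) (rev_gen : List String) (lbl : String) : Int × Int :=
  if PySem.Str.lower lbl == gl then (4, 0)
  else if PySem.Str.isIn lbl g then (3, 0)
  else if PySem.Str.isIn g lbl && decide (3 < PySem.Str.len g) then (2, 0)
  else
    let score : Int := ((rev_gen.zip ((PySem.Str.split? (PySem.Str.stripChars lbl "/") "/").getD []).reverse).countP
      (fun p => PySem.Str.lower p.1 == PySem.Str.lower p.2) : Nat)
    if 0 < score then (1, score) else (0, 0)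

-- Python's strict lexicographic 'key > best_key' on the Int pairs
def pvBeats (a b : Int × Int) : Bool := decide (b.1 < a.1) || (a.1 == b.1 && decide (b.2 < a.2))

-- one iteration of B's single best-label loop
def pvBStep (g gl : String) (rg : List String) (st : String × Int × Int) (lbl : String) : String × Int × Int :=
  let key := pvKey g gl rg lbl
  if pvBeats key st.2 then (lbl, key) else st

def find_closest_label_alt (generated : String) (valid_labels : List String) : String :=
  let g := PySem.Str.strip (PySem.List.pyGetD ((PySem.Str.split? (PySem.Str.strip generated) "\n").getD []) 0 "")
  if valid_labels.contains g then g
  else if g == "NA" || PySem.Str.lower g == "na" || PySem.Str.lower g == "none" then "NA"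
  else
    let gen_lower := PySem.Str.lower g
    let rev_gen := ((PySem.Str.split? (PySem.Str.stripChars g "/") "/").getD []).reverse
    (valid_labels.foldl (pvBStep g gen_lower rev_gen) ("NA", 0, 0)).1

-- ===== PRECONDITION & SPEC =====
def Spec_find_closest_label (generated : String) (valid_labels : List String) (out : String) : Prop := out = find_closest_label_alt generated valid_labels
instance (generated : String) (valid_labels : List String) (out : String) : Decidable (Spec_find_closest_label generated valid_labels out) := by unfold Spec_find_closest_label; infer_instance

-- ===== CLAIM (what is proved, stated in full; the proofs are below) =====
def Claim_equal_find_closest_label : Prop := ∀ (generated : String) (valid_labels : List String), Dom_find_closest_label generated valid_labels → Spec_find_closest_label generated valid_labels (find_closest_label generated valid_labels)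

-- ===== LEMMAS AND PROOFS =====

-- shape of a priority key
theorem pvKey_shape (g gl : String) (rg : List String) (l : String) :
    pvKey g gl rg l = (4, 0) ∨ pvKey g gl rg l = (3, 0) ∨ pvKey g gl rg l = (2, 0) ∨
    (∃ s, 0 < s ∧ pvKey g gl rg l = (1, s)) ∨ pvKey g gl rg l = (0, 0) := by
  simp only [pvKey]
  split_ifs with h1 h2 h3 h4
  · exact Or.inl rfl
  · exact Or.inr (Or.inl rfl)
  · exact Or.inr (Or.inr (Or.inl rfl))
  · exact Or.inr (Or.inr (Or.inr (Or.inl ⟨_, h4, rfl⟩)))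
  · exact Or.inr (Or.inr (Or.inr (Or.inr rfl)))

theorem pvKey_t4 (g gl : String) (rg : List String) (l : String)
    (h : (PySem.Str.lower l == gl) = true) : pvKey g gl rg l = (4, 0) := by
  unfold pvKey; rw [h]; simp

theorem pvKey_t3 (g gl : String) (rg : List String) (l : String)
    (h4 : (PySem.Str.lower l == gl) = false) (h3 : PySem.Str.isIn l g = true) :
    pvKey g gl rg l = (3, 0) := by
  unfold pvKey; rw [h4, h3]; simp

theorem pvKey_t2 (g gl : String) (rg : List String) (l : String)
    (h4 : (PySem.Str.lower l == gl) = false) (h3 : PySem.Str.isIn l g = false)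
    (h2 : (PySem.Str.isIn g l && decide (3 < PySem.Str.len g)) = true) :
    pvKey g gl rg l = (2, 0) := by
  unfold pvKey; rw [h4, h3, h2]; simp

theorem pvKey_fst_le4 (g gl : String) (rg : List String) (l : String) :
    (pvKey g gl rg l).1 ≤ 4 := by
  rcases pvKey_shape g gl rg l with h | h | h | ⟨s, _, h⟩ | h <;> simp [h]

theorem pvKey_fst_le3 (g gl : String) (rg : List String) (l : String)
    (h4 : (PySem.Str.lower l == gl) = false) : (pvKey g gl rg l).1 ≤ 3 := by
  simp only [pvKey]
  rw [h4]
  split_ifs <;> simp_all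

theorem pvKey_fst_le2 (g gl : String) (rg : List String) (l : String)
    (h4 : (PySem.Str.lower l == gl) = false) (h3 : PySem.Str.isIn l g = false) :
    (pvKey g gl rg l).1 ≤ 2 := by
  simp only [pvKey]
  rw [h4, h3]
  split_ifs <;> simp_all

theorem pvKey_fst_le1 (g gl : String) (rg : List String) (l : String)
    (h4 : (PySem.Str.lower l == gl) = false) (h3 : PySem.Str.isIn l g = false)
    (h2 : (PySem.Str.isIn g l && decide (3 < PySem.Str.len g)) = false) :
    (pvKey g gl rg l).1 ≤ 1 := by
  simp only [pvKey]
  rw [h4, h3, h2]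
  split_ifs <;> simp_all

-- a key of tier ≤ c never beats (c, 0) when 2 ≤ c
theorem pvBeats_false (g gl : String) (rg : List String) (z : String) (c : Int)
    (hz : (pvKey g gl rg z).1 ≤ c) (hc : (2:Int) ≤ c) :
    pvBeats (pvKey g gl rg z) (c, 0) = false := by
  rcases pvKey_shape g gl rg z with h | h | h | ⟨s, hs, h⟩ | h <;>
    rw [h] <;> rw [h] at hz <;> simp [pvBeats] <;> omega

-- B's loop does not move when no key beats the accumulator
theorem foldB_stay (g gl : String) (rg : List String) :
    ∀ (ls : List String) (st : String × Int × Int),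
      (∀ l ∈ ls, pvBeats (pvKey g gl rg l) st.2 = false) →
      ls.foldl (pvBStep g gl rg) st = st := by
  intro ls
  induction ls with
  | nil => intro st _; rfl
  | cons l t ih =>
    intro st h
    have hl := h l (by simp)
    simp only [List.foldl_cons, pvBStep, hl, Bool.false_eq_true, if_false]
    exact ih st (fun x hx => h x (by simp [hx]))

-- the accumulator's tier stays below a bound on the keys
theorem foldB_tier_le (g gl : String) (rg : List String) (c : Int) :
    ∀ (ls : List String) (st : String × Int × Int),
      st.2.1 ≤ c → (∀ l ∈ ls, (pvKey g gl rg l).1 ≤ c) →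
      (ls.foldl (pvBStep g gl rg) st).2.1 ≤ c := by
  intro ls
  induction ls with
  | nil => intro st h _; exact h
  | cons l t ih =>
    intro st hst h
    simp only [List.foldl_cons, pvBStep]
    split
    · exact ih _ (h l (by simp)) (fun x hx => h x (by simp [hx]))
    · exact ih _ hst (fun x hx => h x (by simp [hx]))

-- a label of strictly higher tier than everything before it takes over the accumulator
theorem foldB_reach (g gl : String) (rg : List String) (c : Int)
    (ls1 ls2 : List String) (x : String) (st : String × Int × Int)
    (h1 : ∀ y ∈ ls1, (pvKey g gl rg y).1 ≤ c) (hst : st.2.1 ≤ c)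
    (hx : c < (pvKey g gl rg x).1) :
    (ls1 ++ x :: ls2).foldl (pvBStep g gl rg) st
      = ls2.foldl (pvBStep g gl rg) (x, pvKey g gl rg x) := by
  rw [List.foldl_append, List.foldl_cons]
  have ht := foldB_tier_le g gl rg c ls1 st hst h1
  have hb : pvBeats (pvKey g gl rg x) (ls1.foldl (pvBStep g gl rg) st).2 = true := by
    simp [pvBeats]
    left
    omega
  simp only [pvBStep, hb, if_true]

-- the score a label earns in the path tier
def pvScore (rg : List String) (lbl : String) : Int :=
  ((rg.zip ((PySem.Str.split? (PySem.Str.stripChars lbl "/") "/").getD []).reverse).countP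
    (fun p => PySem.Str.lower p.1 == PySem.Str.lower p.2) : Nat)

theorem pvAStep_eq (gp : List String) (st : Option String × Int) (lbl : String) :
    find_closest_label.pvAStep gp st lbl
      = if st.2 < pvScore gp.reverse lbl then (some lbl, pvScore gp.reverse lbl) else st := by
  simp only [find_closest_label.pvAStep, pvScore]

theorem pvKey_low (g gl : String) (rg : List String) (l : String)
    (h4 : (PySem.Str.lower l == gl) = false) (h3 : PySem.Str.isIn l g = false)
    (h2 : (PySem.Str.isIn g l && decide (3 < PySem.Str.len g)) = false) :
    pvKey g gl rg l = if 0 < pvScore rg l then (1, pvScore rg l) else (0, 0) := by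
  simp only [pvKey, pvScore]
  rw [h4, h3, h2]
  simp

theorem pvIsIn_empty (g : String) : PySem.Str.isIn "" g = true := by
  simp [PySem.Str.isIn]

-- the tier-1 region: no label matches tiers 4/3/2, so A's path loop and B's loop agree
theorem tier1_rel (g gl : String) (gp : List String) :
    ∀ (ls : List String),
      (∀ l ∈ ls, (PySem.Str.lower l == gl) = false ∧ PySem.Str.isIn l g = false ∧
        (PySem.Str.isIn g l && decide (3 < PySem.Str.len g)) = false) →
      ∀ (bm : Option String) (bs : Int) (b : String) (t s : Int),
      s = bs →
      ((bs = 0 ∧ bm = none ∧ b = "NA" ∧ t = 0) ∨ (0 < bs ∧ t = 1 ∧ bm = some b ∧ b ≠ "")) →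
      (match (ls.foldl (find_closest_label.pvAStep gp) (bm, bs)).1 with
       | some x => if x != "" && decide (0 < (ls.foldl (find_closest_label.pvAStep gp) (bm, bs)).2) then x else "NA"
       | none => "NA")
      = (ls.foldl (pvBStep g gl gp.reverse) (b, t, s)).1 := by
  intro ls
  induction ls with
  | nil =>
    intro _ bm bs b t s hs hI
    subst hs
    rcases hI with ⟨hbs, hbm, hb, ht⟩ | ⟨hpos, ht, hbm, hbne⟩
    · subst hbm; subst hb; rfl
    · subst hbm
      simp only [List.foldl_nil]
      simp [hbne, hpos]
  | cons l t' ih =>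
    intro hls bm bs b t s hs hI
    subst hs
    obtain ⟨h4, h3, h2⟩ := hls l (by simp)
    have hls' : ∀ x ∈ t', (PySem.Str.lower x == gl) = false ∧ PySem.Str.isIn x g = false ∧
        (PySem.Str.isIn g x && decide (3 < PySem.Str.len g)) = false :=
      fun x hx => hls x (by simp [hx])
    have hbs0 : 0 ≤ s := by rcases hI with ⟨h, _⟩ | ⟨h, _⟩ <;> omega
    have hkey := pvKey_low g gl gp.reverse l h4 h3 h2
    by_cases hsc : s < pvScore gp.reverse l
    · have hp : 0 < pvScore gp.reverse l := lt_of_le_of_lt hbs0 hsc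
      have hlne : l ≠ "" := by
        intro he
        rw [he, pvIsIn_empty] at h3
        exact absurd h3 (by simp)
      have hA : find_closest_label.pvAStep gp (bm, s) l = (some l, pvScore gp.reverse l) := by
        rw [pvAStep_eq]; simp [hsc]
      have hB : pvBStep g gl gp.reverse (b, t, s) l = (l, (1, pvScore gp.reverse l)) := by
        simp only [pvBStep, hkey, if_pos hp]
        have hbeat : pvBeats (1, pvScore gp.reverse l) (t, s) = true := by
          rcases hI with ⟨hb0, _, _, ht0⟩ | ⟨hbp, ht1, _, _⟩ <;> simp [pvBeats] <;> omega
        rw [if_pos hbeat]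
      simp only [List.foldl_cons, hA, hB]
      exact ih hls' (some l) (pvScore gp.reverse l) l 1 (pvScore gp.reverse l) rfl
        (Or.inr ⟨hp, rfl, rfl, hlne⟩)
    · have hA : find_closest_label.pvAStep gp (bm, s) l = (bm, s) := by
        rw [pvAStep_eq]; simp [hsc]
      have hB : pvBStep g gl gp.reverse (b, t, s) l = (b, t, s) := by
        simp only [pvBStep, hkey]
        have hbeat : pvBeats (if 0 < pvScore gp.reverse l then (1, pvScore gp.reverse l) else (0, 0)) (t, s) = false := by
          rcases hI with ⟨hb0, _, _, ht0⟩ | ⟨hbp, ht1, _, _⟩ <;>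
            split_ifs with hp <;> simp [pvBeats] <;> omega
        rw [hbeat]
        simp
      simp only [List.foldl_cons, hA, hB]
      exact ih hls' bm s b t s rfl hI

-- the whole tail after the shared guards: A's cascade = B's single pass
theorem tail_eq (g gl : String) (gp : List String) (ls : List String) :
    (match ls.find? (fun lbl => PySem.Str.lower lbl == gl) with
     | some lbl => lbl
     | none =>
       match ls.find? (fun lbl => PySem.Str.isIn lbl g) with
       | some lbl => lbl
       | none =>
         match ls.find? (fun lbl => PySem.Str.isIn g lbl && decide (3 < PySem.Str.len g)) with
         | some lbl => lbl
         | none =>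
           match (ls.foldl (find_closest_label.pvAStep gp) (none, 0)).1 with
           | some bm => if bm != "" && decide (0 < (ls.foldl (find_closest_label.pvAStep gp) (none, 0)).2) then bm else "NA"
           | none => "NA")
    = (ls.foldl (pvBStep g gl gp.reverse) ("NA", 0, 0)).1 := by
  cases hf4 : ls.find? (fun lbl => PySem.Str.lower lbl == gl) with
  | some x =>
    simp only
    obtain ⟨hpx, ls1, ls2, hsplit, hpre⟩ := List.find?_eq_some_iff_append.mp hf4
    simp only [Bool.not_eq_eq_eq_not, Bool.not_true] at hpre
    subst hsplit
    rw [foldB_reach g gl gp.reverse 3 ls1 ls2 x _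
      (fun y hy => pvKey_fst_le3 g gl gp.reverse y (hpre y hy)) (by norm_num)
      (by rw [pvKey_t4 g gl gp.reverse x hpx]; norm_num)]
    rw [pvKey_t4 g gl gp.reverse x hpx]
    rw [foldB_stay g gl gp.reverse ls2 (x, 4, 0)
      (fun z _ => pvBeats_false g gl gp.reverse z 4 (pvKey_fst_le4 g gl gp.reverse z) (by norm_num))]
  | none =>
    have hall4 : ∀ l ∈ ls, (PySem.Str.lower l == gl) = false := by
      intro l hl
      simpa using List.find?_eq_none.mp hf4 l hl
    simp only
    cases hf3 : ls.find? (fun lbl => PySem.Str.isIn lbl g) with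
    | some x =>
      simp only
      obtain ⟨hpx, ls1, ls2, hsplit, hpre⟩ := List.find?_eq_some_iff_append.mp hf3
      simp only [Bool.not_eq_eq_eq_not, Bool.not_true] at hpre
      have hall4' := hall4
      subst hsplit
      rw [foldB_reach g gl gp.reverse 2 ls1 ls2 x _
        (fun y hy => pvKey_fst_le2 g gl gp.reverse y (hall4' y (by simp [hy])) (hpre y hy)) (by norm_num)
        (by rw [pvKey_t3 g gl gp.reverse x (hall4' x (by simp)) hpx]; norm_num)]
      rw [pvKey_t3 g gl gp.reverse x (hall4' x (by simp)) hpx]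
      rw [foldB_stay g gl gp.reverse ls2 (x, 3, 0)
        (fun z hz => pvBeats_false g gl gp.reverse z 3
          (pvKey_fst_le3 g gl gp.reverse z (hall4' z (by simp [hz]))) (by norm_num))]
    | none =>
      have hall3 : ∀ l ∈ ls, PySem.Str.isIn l g = false := by
        intro l hl
        simpa using List.find?_eq_none.mp hf3 l hl
      simp only
      cases hf2 : ls.find? (fun lbl => PySem.Str.isIn g lbl && decide (3 < PySem.Str.len g)) with
      | some x =>
        simp only
        obtain ⟨hpx, ls1, ls2, hsplit, hpre⟩ := List.find?_eq_some_iff_append.mp hf2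
        simp only [Bool.not_eq_eq_eq_not, Bool.not_true] at hpre
        have hall4' := hall4
        have hall3' := hall3
        subst hsplit
        rw [foldB_reach g gl gp.reverse 1 ls1 ls2 x _
          (fun y hy => pvKey_fst_le1 g gl gp.reverse y (hall4' y (by simp [hy]))
            (hall3' y (by simp [hy])) (hpre y hy)) (by norm_num)
          (by rw [pvKey_t2 g gl gp.reverse x (hall4' x (by simp)) (hall3' x (by simp)) hpx]; norm_num)]
        rw [pvKey_t2 g gl gp.reverse x (hall4' x (by simp)) (hall3' x (by simp)) hpx]
        rw [foldB_stay g gl gp.reverse ls2 (x, 2, 0)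
          (fun z hz => pvBeats_false g gl gp.reverse z 2
            (pvKey_fst_le2 g gl gp.reverse z (hall4' z (by simp [hz])) (hall3' z (by simp [hz])))
            (by norm_num))]
      | none =>
        have hall2 : ∀ l ∈ ls, (PySem.Str.isIn g l && decide (3 < PySem.Str.len g)) = false := by
          intro l hl
          simpa using List.find?_eq_none.mp hf2 l hl
        simp only
        exact tier1_rel g gl gp ls
          (fun l hl => ⟨hall4 l hl, hall3 l hl, hall2 l hl⟩)
          none 0 "NA" 0 0 rfl (Or.inl ⟨rfl, rfl, rfl, rfl⟩)

-- ===== VERDICT (by name: the statement is the Claim_ definition above) =====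
theorem find_closest_label_spec : Claim_equal_find_closest_label := by
  intro generated valid_labels _
  unfold Spec_find_closest_label
  simp only [find_closest_label, find_closest_label_alt]
  split_ifs with c1 c2
  · rfl
  · rfl
  · exact tail_eq _ _ _ valid_labels
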